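-- pv_equiv track=rewrite | github.com/ran1001001/boot.dev | challenges-guided_project/Python/double_string.py | double_string
-- ===== SOURCE A (Python) =====
-- def double_string(string):
--     doubled = ''
--     for letter in string:
--         if letter == ' ' or letter is None:
--             doubled += ' '
--             continue
--         doubled = doubled + (2 * letter)
--     return doubled
-- ===== SOURCE B (Python) =====
-- def double_string(string):
--     table = {ord(ch): ch * 2 for ch in set(string) if ch != ' '}
--     return string.translate(table)
-- ===== Notes on version B (the rewrite author's own statement) =====
-- stated objective: idiomatic
-- what changed: Replaces the explicit accumulate loop with a translation table built once from the distinct non-space characters and a single str.translate call, so the transformation pass has no per-character Python-level branch.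
import Mathlib
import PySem

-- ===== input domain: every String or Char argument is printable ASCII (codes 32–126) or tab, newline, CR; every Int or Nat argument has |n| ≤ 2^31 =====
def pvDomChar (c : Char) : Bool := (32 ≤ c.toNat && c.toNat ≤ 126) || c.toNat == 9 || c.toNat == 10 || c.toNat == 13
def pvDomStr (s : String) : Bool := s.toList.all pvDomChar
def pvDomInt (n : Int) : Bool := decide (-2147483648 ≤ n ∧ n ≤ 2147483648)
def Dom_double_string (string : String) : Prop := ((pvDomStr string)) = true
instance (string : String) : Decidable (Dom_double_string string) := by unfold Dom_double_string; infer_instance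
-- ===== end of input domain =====

-- B builds a translation table from the distinct non-space characters once and applies it in a
-- single translate pass, instead of A's explicit accumulate loop with a per-character branch.


-- ===== PORT A =====
-- 'letter is None' is always False for characters of a str, so the test reduces to letter == ' '.
def double_string (string : String) : String :=
  String.mk (string.toList.foldl
    (fun doubled letter => if letter = ' ' then doubled ++ [' '] else doubled ++ [letter, letter])
    [])

-- ===== PORT B =====
-- table = {ord(ch): ch*2 for ch in set(string) if ch != ' '}; return string.translate(table)
-- (translate: each character is replaced by its table entry, unmapped characters stay themselves)
def double_string_alt (string : String) : String :=
  let table : PySem.Dict Char (List Char) :=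
    (PySem.Set.ofList string.toList).foldl
      (fun d ch => if ch ≠ ' ' then d.insert ch [ch, ch] else d) PySem.Dict.empty
  String.mk (string.toList.flatMap (fun c => table.getD c [c]))

-- ===== PRECONDITION & SPEC =====
def Spec_double_string (string : String) (out : String) : Prop := out = double_string_alt string
instance (string : String) (out : String) : Decidable (Spec_double_string string out) := by unfold Spec_double_string; infer_instance

-- ===== CLAIM (what is proved, stated in full; the proofs are below) =====
def Claim_equal_double_string : Prop := ∀ (string : String), Dom_double_string string → Spec_double_string string (double_string string)

-- ===== LEMMAS AND PROOFS =====

theorem pv_tbl_get? (l : List Char) (d0 : PySem.Dict Char (List Char)) (c : Char) :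
    (l.foldl (fun d ch => if ch ≠ ' ' then d.insert ch [ch, ch] else d) d0).get? c =
      if c ≠ ' ' ∧ c ∈ l then some [c, c] else d0.get? c := by
  induction l generalizing d0 with
  | nil => simp
  | cons x xs ih =>
    simp only [List.foldl_cons, ih]
    by_cases hx : x = ' '
    · subst hx
      by_cases hc : c = ' ' <;> simp [hc]
    · simp only [if_pos (show x ≠ ' ' from hx)]
      by_cases hcx : c = x
      · subst hcx
        simp [hx, PySem.Dict.get?_insert_self]
      · by_cases hc : c = ' '
        · subst hc
          simp [PySem.Dict.get?_insert_of_ne _ _ hcx]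
        · simp only [List.mem_cons]
          by_cases hmem : c ∈ xs
          · simp [hc, hmem]
          · simp [hc, hmem, hcx, PySem.Dict.get?_insert_of_ne _ _ hcx]

theorem pv_tbl_getD (s : List Char) (c : Char) (hc : c ∈ s) :
    ((PySem.Set.ofList s).foldl
        (fun d ch => if ch ≠ ' ' then d.insert ch [ch, ch] else d) PySem.Dict.empty).getD c [c] =
      if c = ' ' then [' '] else [c, c] := by
  have hmem : c ∈ PySem.Set.ofList s := by
    simpa [PySem.Set.mem_ofList] using hc
  rw [PySem.Dict.getD, pv_tbl_get? (PySem.Set.ofList s) PySem.Dict.empty c]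
  by_cases h : c = ' '
  · simp [h, PySem.Dict.get?_empty]
  · simp [h, hmem]

-- ===== VERDICT (by name: the statement is the Claim_ definition above) =====

theorem double_string_spec : Claim_equal_double_string := by
  intro s _
  unfold Spec_double_string double_string double_string_alt
  congr 1
  have hfun : (fun (doubled : List Char) letter =>
        if letter = ' ' then doubled ++ [' '] else doubled ++ [letter, letter]) =
      (fun doubled letter => doubled ++ (if letter = ' ' then [' '] else [letter, letter])) := by
    funext d l; split <;> rfl
  rw [hfun, PySem.List.foldl_append_eq_flatMap]
  simp only [List.nil_append, List.flatMap_def]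
  refine congrArg List.flatten (List.map_congr_left ?_)
  intro c hc
  rw [pv_tbl_getD s.toList c hc]
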